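-- pv_equiv track=rewrite | github.com/jhonatang1988/holbertonschool-interview | 0x0C-nqueens/2-nqueens.py | diagonal_attack
-- ===== SOURCE A (Python) =====
-- from typing import List, Generator
--
-- def position_Generator(n: int = 4) -> Generator[List[int], None, None]:
--     """
--     generator to sent back a position [0, 0]
--     :param n: number of queens
--     :return: yields a position in the chess
--     """
--     return ([i, j] for i in range(0, n) for j in range(0, n))
--
-- def diagonal_attack(pos: List[int], d_queens: int) -> List[List[int]]:
--     """
--     attack the position diagonal and sends back a list of death
--     :param d_queens: number of queens
--     :param pos: position to attack from with the queen
--     :return: list of deaths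
--     """
--     list_deaths = []
--     pos_gen = position_Generator(d_queens)
--     while True:
--         try:
--             new_pos = next(pos_gen)
--         except StopIteration:
--             break
--         if pos == new_pos:
--             continue
--         if pos[0] + pos[1] == new_pos[0] + new_pos[1]:
--             list_deaths.append(new_pos)
--         if pos[0] - new_pos[0] == pos[1] - new_pos[1]:
--             list_deaths.append(new_pos)
--     return list_deaths
-- ===== SOURCE B (Python) =====
-- def diagonal_attack(pos, d_queens):
--     """O(n) re-implementation: enumerate the two diagonals through pos per row."""
--     s = pos[0] + pos[1]
--     d = pos[0] - pos[1]
--     deaths = []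
--     for i in range(d_queens):
--         ja = s - i          # anti-diagonal cell in row i
--         jm = i - d          # main-diagonal cell in row i
--         lo, hi = (ja, jm) if ja <= jm else (jm, ja)
--         for j in (lo, hi):
--             if 0 <= j < d_queens and [i, j] != pos:
--                 deaths.append([i, j])
--     return deaths
-- ===== Notes on version B (the rewrite author's own statement) =====
-- stated objective: faster
-- what changed: Instead of scanning all n*n board cells and testing each against the two diagonal conditions, B directly computes, for each row i, the at-most-two column indices (s-i on the anti-diagonal, i-(p0-p1) on the main diagonal) and emits them in ascending-column order, matching A's row-major scan order exactly.
-- outside the precondition, e.g. on diagonal_attack([], 0): A returns [], B raises IndexError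
import Mathlib
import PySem

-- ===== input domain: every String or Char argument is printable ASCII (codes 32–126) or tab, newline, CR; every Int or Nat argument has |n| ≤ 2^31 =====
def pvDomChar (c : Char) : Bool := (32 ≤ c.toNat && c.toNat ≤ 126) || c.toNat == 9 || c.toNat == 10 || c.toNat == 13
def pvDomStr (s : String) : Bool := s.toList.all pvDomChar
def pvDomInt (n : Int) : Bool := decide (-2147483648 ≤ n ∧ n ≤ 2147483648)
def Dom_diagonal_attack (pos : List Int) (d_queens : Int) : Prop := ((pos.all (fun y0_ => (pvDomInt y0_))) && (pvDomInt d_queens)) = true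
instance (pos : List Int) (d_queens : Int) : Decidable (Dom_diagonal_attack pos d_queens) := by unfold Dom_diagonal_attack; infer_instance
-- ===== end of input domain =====

-- B replaces A's scan of all n*n cells with a per-row O(n) enumeration of the two
-- diagonal cells through pos, preserving A's row-major emission order (objective: faster, asymptotic).

-- ===== PORT A =====
-- pos[0]/pos[1]: exact under Pre_ (pos has at least 2 elements; Python raises IndexError otherwise)
def diagonal_attack (pos : List Int) (d_queens : Int) : List (List Int) :=
  let p0 := (PySem.List.pyGet? pos 0).getD 0
  let p1 := (PySem.List.pyGet? pos 1).getD 0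
  ((PySem.List.pyRange 0 d_queens 1).flatMap (fun i =>
      (PySem.List.pyRange 0 d_queens 1).map (fun j => [i, j]))).foldl
    (fun acc new_pos =>
      if pos = new_pos then acc
      else
        let n0 := (PySem.List.pyGet? new_pos 0).getD 0
        let n1 := (PySem.List.pyGet? new_pos 1).getD 0
        let acc := if p0 + p1 = n0 + n1 then acc ++ [new_pos] else acc
        if p0 - n0 = p1 - n1 then acc ++ [new_pos] else acc)
    []

-- ===== PORT B =====
def diagonal_attack_alt (pos : List Int) (d_queens : Int) : List (List Int) :=
  let p0 := (PySem.List.pyGet? pos 0).getD 0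
  let p1 := (PySem.List.pyGet? pos 1).getD 0
  let s := p0 + p1
  let d := p0 - p1
  (PySem.List.pyRange 0 d_queens 1).foldl (fun deaths i =>
    let ja := s - i
    let jm := i - d
    let lo := if ja ≤ jm then ja else jm
    let hi := if ja ≤ jm then jm else ja
    [lo, hi].foldl (fun deaths j =>
      if 0 ≤ j ∧ j < d_queens ∧ [i, j] ≠ pos then deaths ++ [[i, j]] else deaths) deaths) []

-- ===== PRECONDITION & SPEC =====
-- Pre_ excludes pos shorter than 2: there Python B's eager pos[0]/pos[1] raises IndexError, as does A
-- whenever its loop runs (A happens to return [] when d_queens <= 0, where B still raises).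
def Pre_diagonal_attack (pos : List Int) (d_queens : Int) : Prop := 2 ≤ pos.length
instance (pos : List Int) (d_queens : Int) : Decidable (Pre_diagonal_attack pos d_queens) := by unfold Pre_diagonal_attack; infer_instance
def pvWitness_diagonal_attack : List Int × Int := ([1, 2], 4)
def Spec_diagonal_attack (pos : List Int) (d_queens : Int) (out : List (List Int)) : Prop := out = diagonal_attack_alt pos d_queens
instance (pos : List Int) (d_queens : Int) (out : List (List Int)) : Decidable (Spec_diagonal_attack pos d_queens out) := by unfold Spec_diagonal_attack; infer_instance

-- ===== CLAIM (what is proved, stated in full; the proofs are below) =====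
def Claim_equal_diagonal_attack : Prop := ∀ (pos : List Int) (d_queens : Int), Dom_diagonal_attack pos d_queens → Pre_diagonal_attack pos d_queens → Spec_diagonal_attack pos d_queens (diagonal_attack pos d_queens)

-- ===== LEMMAS AND PROOFS =====

-- A's per-cell contribution (what one iteration of A's while-loop appends)
def cellA (pos : List Int) (p0 p1 : Int) (np : List Int) : List (List Int) :=
  if pos = np then []
  else (if p0 + p1 = (PySem.List.pyGet? np 0).getD 0 + (PySem.List.pyGet? np 1).getD 0 then [np] else []) ++
       (if p0 - (PySem.List.pyGet? np 0).getD 0 = p1 - (PySem.List.pyGet? np 1).getD 0 then [np] else [])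

-- B's per-candidate contribution and per-row output
def contribB (pos : List Int) (n i j : Int) : List (List Int) :=
  if 0 ≤ j ∧ j < n ∧ [i, j] ≠ pos then [[i, j]] else []

def rowB (pos : List Int) (n p0 p1 i : Int) : List (List Int) :=
  if p0 + p1 - i ≤ i - (p0 - p1)
  then contribB pos n i (p0 + p1 - i) ++ contribB pos n i (i - (p0 - p1))
  else contribB pos n i (i - (p0 - p1)) ++ contribB pos n i (p0 + p1 - i)

lemma flatMap_flatMap' {α β γ : Type} (l : List α) (f : α → List β) (g : β → List γ) :
    (l.flatMap f).flatMap g = l.flatMap (fun x => (f x).flatMap g) := by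
  induction l with
  | nil => rfl
  | cons x xs ih => simp [List.flatMap_cons, List.flatMap_append, ih]

-- flatMap over range(0,n) of a function supported on at most the two points a < b
lemma flatMap_support_two (g : Int → List (List Int)) (a b : Int) (hab : a < b)
    (hg : ∀ j, j ≠ a → j ≠ b → g j = []) (n : Int) :
    (PySem.List.pyRange 0 n 1).flatMap g =
      (if 0 ≤ a ∧ a < n then g a else []) ++ (if 0 ≤ b ∧ b < n then g b else []) := by
  by_cases h : n ≤ 0
  · have h1 : ¬ (0 ≤ a ∧ a < n) := by omega
    have h2 : ¬ (0 ≤ b ∧ b < n) := by omega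
    rw [PySem.List.pyRange_one_eq_nil h, if_neg h1, if_neg h2]
    rfl
  · have key : ∀ m : Nat, (PySem.List.pyRange 0 (m : Int) 1).flatMap g =
        (if 0 ≤ a ∧ a < (m : Int) then g a else []) ++ (if 0 ≤ b ∧ b < (m : Int) then g b else []) := by
      intro m
      induction m with
      | zero =>
        have h1 : ¬ (0 ≤ a ∧ a < ((0 : Nat) : Int)) := by omega
        have h2 : ¬ (0 ≤ b ∧ b < ((0 : Nat) : Int)) := by omega
        rw [if_neg h1, if_neg h2]
        simp [PySem.List.pyRange_one_eq_nil]
      | succ m ih =>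
        have hcast : ((m + 1 : Nat) : Int) = (m : Int) + 1 := by push_cast; ring
        rw [hcast, PySem.List.pyRange_one_succ_right (by positivity), List.flatMap_append, ih]
        simp only [List.flatMap_cons, List.flatMap_nil, List.append_nil]
        by_cases ha : (m : Int) = a
        · have h1 : ¬ (0 ≤ a ∧ a < (m : Int)) := by omega
          have h2 : ¬ (0 ≤ b ∧ b < (m : Int)) := by omega
          have h3 : 0 ≤ a ∧ a < (m : Int) + 1 := by omega
          have h4 : ¬ (0 ≤ b ∧ b < (m : Int) + 1) := by omega
          rw [if_neg h1, if_neg h2, if_pos h3, if_neg h4, ha]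
          simp
        · by_cases hb : (m : Int) = b
          · rw [hb]
            have h2 : 0 ≤ b ∧ b < b + 1 := by omega
            have h4 : ¬ (0 ≤ b ∧ b < b) := by omega
            rw [if_neg h4, if_pos h2]
            by_cases hax : 0 ≤ a ∧ a < b
            · have h5 : 0 ≤ a ∧ a < b + 1 := by omega
              rw [if_pos hax, if_pos h5, List.append_assoc]
              simp
            · have h5 : ¬ (0 ≤ a ∧ a < b + 1) := by omega
              rw [if_neg hax, if_neg h5]
              simp
          · rw [hg _ ha hb]
            by_cases hax : 0 ≤ a ∧ a < (m : Int)
            · have h5 : 0 ≤ a ∧ a < (m : Int) + 1 := by omega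
              rw [if_pos hax, if_pos h5]
              by_cases hbx : 0 ≤ b ∧ b < (m : Int)
              · have h6 : 0 ≤ b ∧ b < (m : Int) + 1 := by omega
                rw [if_pos hbx, if_pos h6]; simp
              · have h6 : ¬ (0 ≤ b ∧ b < (m : Int) + 1) := by omega
                rw [if_neg hbx, if_neg h6]; simp
            · have h5 : ¬ (0 ≤ a ∧ a < (m : Int) + 1) := by omega
              rw [if_neg hax, if_neg h5]
              by_cases hbx : 0 ≤ b ∧ b < (m : Int)
              · have h6 : 0 ≤ b ∧ b < (m : Int) + 1 := by omega
                rw [if_pos hbx, if_pos h6]; simp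
              · have h6 : ¬ (0 ≤ b ∧ b < (m : Int) + 1) := by omega
                rw [if_neg hbx, if_neg h6]; simp
    have hn : n = (n.toNat : Int) := by omega
    rw [hn]; exact key n.toNat

-- flatMap over range(0,n) of a function supported on at most one point
lemma flatMap_support_one (g : Int → List (List Int)) (a : Int)
    (hg : ∀ j, j ≠ a → g j = []) (n : Int) :
    (PySem.List.pyRange 0 n 1).flatMap g = (if 0 ≤ a ∧ a < n then g a else []) := by
  by_cases h : n ≤ 0
  · have h1 : ¬ (0 ≤ a ∧ a < n) := by omega
    rw [PySem.List.pyRange_one_eq_nil h, if_neg h1]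
    rfl
  · have key : ∀ m : Nat, (PySem.List.pyRange 0 (m : Int) 1).flatMap g =
        (if 0 ≤ a ∧ a < (m : Int) then g a else []) := by
      intro m
      induction m with
      | zero =>
        have h1 : ¬ (0 ≤ a ∧ a < ((0 : Nat) : Int)) := by omega
        rw [if_neg h1]
        simp [PySem.List.pyRange_one_eq_nil]
      | succ m ih =>
        have hcast : ((m + 1 : Nat) : Int) = (m : Int) + 1 := by push_cast; ring
        rw [hcast, PySem.List.pyRange_one_succ_right (by positivity), List.flatMap_append, ih]
        simp only [List.flatMap_cons, List.flatMap_nil, List.append_nil]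
        by_cases ha : (m : Int) = a
        · have h1 : ¬ (0 ≤ a ∧ a < (m : Int)) := by omega
          have h3 : 0 ≤ a ∧ a < (m : Int) + 1 := by omega
          rw [if_neg h1, if_pos h3, ha]
          simp
        · rw [hg _ ha]
          by_cases hax : 0 ≤ a ∧ a < (m : Int)
          · have h5 : 0 ≤ a ∧ a < (m : Int) + 1 := by omega
            rw [if_pos hax, if_pos h5]; simp
          · have h5 : ¬ (0 ≤ a ∧ a < (m : Int) + 1) := by omega
            rw [if_neg hax, if_neg h5]; simp
    have hn : n = (n.toNat : Int) := by omega
    rw [hn]; exact key n.toNat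

lemma cellA_pair (pos : List Int) (p0 p1 i j : Int) :
    cellA pos p0 p1 [i, j] =
      (if pos = [i, j] then []
       else (if p0 + p1 = i + j then [[i, j]] else []) ++
            (if p0 - i = p1 - j then [[i, j]] else [])) := by
  simp [cellA, PySem.List.pyGet?, PySem.List.pyIdx?]

-- the core per-row equality: A's scan of row i equals B's two diagonal candidates for row i
lemma row_eq (pos : List Int) (p0 p1 n i : Int) :
    (PySem.List.pyRange 0 n 1).flatMap (fun j => cellA pos p0 p1 [i, j]) =
      rowB pos n p0 p1 i := by
  have hsup : ∀ j, j ≠ p0 + p1 - i → j ≠ i - (p0 - p1) → cellA pos p0 p1 [i, j] = [] := by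
    intro j h1 h2
    rw [cellA_pair]
    have e1 : ¬ (p0 + p1 = i + j) := by omega
    have e2 : ¬ (p0 - i = p1 - j) := by omega
    simp only [if_neg e1, if_neg e2, List.append_nil]
    split <;> rfl
  by_cases hlt : p0 + p1 - i = i - (p0 - p1)
  · -- the two diagonal columns coincide in row i
    rw [flatMap_support_one _ (p0 + p1 - i) (fun j h => hsup j h (by omega)) n]
    unfold rowB
    rw [← hlt, if_pos le_rfl]
    by_cases hin : 0 ≤ p0 + p1 - i ∧ p0 + p1 - i < n
    · rw [if_pos hin, cellA_pair]
      unfold contribB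
      by_cases hp : pos = [i, p0 + p1 - i]
      · have hq : ¬ (0 ≤ p0 + p1 - i ∧ p0 + p1 - i < n ∧ [i, p0 + p1 - i] ≠ pos) := by
          simp [hp]
        rw [if_pos hp, if_neg hq]
        rfl
      · have e1 : p0 + p1 = i + (p0 + p1 - i) := by ring
        have e2 : p0 - i = p1 - (p0 + p1 - i) := by omega
        have hq : 0 ≤ p0 + p1 - i ∧ p0 + p1 - i < n ∧ [i, p0 + p1 - i] ≠ pos :=
          ⟨hin.1, hin.2, fun h => hp h.symm⟩
        rw [if_neg hp, if_pos e1, if_pos e2, if_pos hq]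
    · have hq : ¬ (0 ≤ p0 + p1 - i ∧ p0 + p1 - i < n ∧ [i, p0 + p1 - i] ≠ pos) := by
        intro h; exact hin ⟨h.1, h.2.1⟩
      rw [if_neg hin]
      unfold contribB
      rw [if_neg hq]
      rfl
  · have hone : ∀ c : Int, (c = p0 + p1 - i ∨ c = i - (p0 - p1)) →
        (if 0 ≤ c ∧ c < n then cellA pos p0 p1 [i, c] else []) = contribB pos n i c := by
      intro c hc
      rw [cellA_pair]
      unfold contribB
      by_cases hin : 0 ≤ c ∧ c < n
      · rw [if_pos hin]
        by_cases hp : pos = [i, c]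
        · have hq : ¬ (0 ≤ c ∧ c < n ∧ [i, c] ≠ pos) := by simp [hp]
          rw [if_pos hp, if_neg hq]
        · have hq : 0 ≤ c ∧ c < n ∧ [i, c] ≠ pos := ⟨hin.1, hin.2, fun h => hp h.symm⟩
          rw [if_neg hp, if_pos hq]
          rcases hc with hc | hc
          · have e1 : p0 + p1 = i + c := by omega
            have e2 : ¬ (p0 - i = p1 - c) := by omega
            rw [if_pos e1, if_neg e2]
            rfl
          · have e1 : ¬ (p0 + p1 = i + c) := by omega
            have e2 : p0 - i = p1 - c := by omega
            rw [if_neg e1, if_pos e2]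
            rfl
      · have hq : ¬ (0 ≤ c ∧ c < n ∧ [i, c] ≠ pos) := by intro h; exact hin ⟨h.1, h.2.1⟩
        rw [if_neg hin, if_neg hq]
    rcases lt_or_gt_of_ne hlt with h | h
    · rw [flatMap_support_two _ _ _ h (fun j h1 h2 => hsup j h1 h2) n,
        hone _ (Or.inl rfl), hone _ (Or.inr rfl)]
      unfold rowB
      rw [if_pos (le_of_lt h)]
    · rw [flatMap_support_two _ _ _ h (fun j h1 h2 => hsup j h2 h1) n,
        hone _ (Or.inr rfl), hone _ (Or.inl rfl)]
      unfold rowB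
      rw [if_neg (by omega)]

lemma portA_eq_flatMap (pos : List Int) (n : Int) :
    diagonal_attack pos n =
      (PySem.List.pyRange 0 n 1).flatMap (fun i =>
        (PySem.List.pyRange 0 n 1).flatMap (fun j =>
          cellA pos ((PySem.List.pyGet? pos 0).getD 0) ((PySem.List.pyGet? pos 1).getD 0) [i, j])) := by
  unfold diagonal_attack
  refine (PySem.List.foldl_congr_mem' _ _
    (fun acc np => acc ++ cellA pos ((PySem.List.pyGet? pos 0).getD 0) ((PySem.List.pyGet? pos 1).getD 0) np)
    _ ?_).trans ?_
  · intro np _ acc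
    simp only [cellA]
    split_ifs <;> simp
  · rw [PySem.List.foldl_append_eq_flatMap, List.nil_append, flatMap_flatMap']
    congr 1
    funext i
    rw [List.flatMap_map]

lemma portB_eq_flatMap (pos : List Int) (n : Int) :
    diagonal_attack_alt pos n =
      (PySem.List.pyRange 0 n 1).flatMap
        (fun i => rowB pos n ((PySem.List.pyGet? pos 0).getD 0) ((PySem.List.pyGet? pos 1).getD 0) i) := by
  unfold diagonal_attack_alt
  refine (PySem.List.foldl_congr_mem' _ _
    (fun deaths i => deaths ++ rowB pos n ((PySem.List.pyGet? pos 0).getD 0) ((PySem.List.pyGet? pos 1).getD 0) i)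
    _ ?_).trans ?_
  · intro i _ deaths
    simp only [rowB, contribB, List.foldl]
    split_ifs <;> simp_all
  · rw [PySem.List.foldl_append_eq_flatMap, List.nil_append]

-- ===== VERDICT (by name: the statement is the Claim_ definition above) =====
theorem diagonal_attack_spec : Claim_equal_diagonal_attack := by
  intro pos n _ _
  unfold Spec_diagonal_attack
  rw [portA_eq_flatMap pos n, portB_eq_flatMap pos n]
  congr 1
  funext i
  exact row_eq pos _ _ n i
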